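-- pv_equiv track=rewrite | github.com/ajmedeio/algos | src/2237-count-positions-on-street-with-required-brightness/2237. Count Positions on Street With Required Brightness.py | meetRequirement
-- ===== SOURCE A (Python) =====
-- from typing import List
--
-- def meetRequirement(n: int, L: List[List[int]], R: List[int]) -> int:
--     out = 0
--     I = [0] * n
--     for p, r in L:
--         I[max(0, p - r)] += 1
--         if p+r+1 < n:
--             I[p+r+1] -= 1
--     for i in range(1, n):
--         I[i] += I[i-1]
--     for i in range(n):
--         if I[i] >= R[i]:
--             out += 1
--     return out
-- ===== SOURCE B (Python) =====
-- def meetRequirement(n, L, R):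
--     out = 0
--     for i in range(n):
--         # net number of lights covering position i: on when p - r <= i <= p + r
--         lit = sum((p - r <= i) - (p + r < i) for p, r in L)
--         if lit >= R[i]:
--             out += 1
--     return out
-- ===== Notes on version B (the rewrite author's own statement) =====
-- stated objective: simpler
-- what changed: Replaces A's three-pass difference-array pipeline (build point updates, in-place prefix sum, compare) with a direct per-position scan that counts the lights covering each position, with no auxiliary array; Pre_ excludes inputs where A raises (light start index out of range, R shorter than n, non-pair light) and lights reaching entirely left of the street (p + r < -1), an unspecified corner where A's negative-index write wraps to the end of the array.
-- outside the precondition, e.g. on meetRequirement(3, [[-4, 1]], [1, 0, 0]): A returns 3, B returns 2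
import Mathlib
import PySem

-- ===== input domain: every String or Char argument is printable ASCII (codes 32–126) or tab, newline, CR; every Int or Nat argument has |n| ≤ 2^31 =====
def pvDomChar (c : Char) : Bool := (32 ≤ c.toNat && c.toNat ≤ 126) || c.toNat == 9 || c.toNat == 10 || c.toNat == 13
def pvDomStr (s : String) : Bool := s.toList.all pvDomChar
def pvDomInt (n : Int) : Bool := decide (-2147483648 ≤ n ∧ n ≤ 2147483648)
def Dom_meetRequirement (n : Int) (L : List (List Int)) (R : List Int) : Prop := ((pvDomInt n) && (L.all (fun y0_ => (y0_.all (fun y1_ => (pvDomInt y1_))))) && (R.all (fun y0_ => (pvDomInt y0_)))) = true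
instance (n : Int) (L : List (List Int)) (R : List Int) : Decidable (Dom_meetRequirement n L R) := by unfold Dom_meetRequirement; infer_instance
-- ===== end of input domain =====

-- B replaces A's difference-array / prefix-sum / compare pipeline by a direct per-position
-- scan of the lights (simpler: no auxiliary array); equivalence is proved on Pre_ below.


-- ===== PORT A =====

-- Python `I[j] = f(I[j])`: exact for -len I ≤ j < len I (negative j wraps); Python raises
-- IndexError outside that range (such inputs are excluded by Pre_ below).
def pyModify (I : List Int) (j : Int) (f : Int → Int) : List Int :=
  if j < 0 then I.modify ((I.length : Int) + j).toNat f else I.modify j.toNat f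

-- body of A's first loop, one light `p, r = lt` (a non-pair makes Python raise; excluded by Pre_)
def aLight (n : Int) (I : List Int) (lt : List Int) : List Int :=
  match lt with
  | [p, r] =>
      let I' := pyModify I (max 0 (p - r)) (fun x => x + 1)
      if p + r + 1 < n then pyModify I' (p + r + 1) (fun x => x - 1) else I'
  | _ => I

def meetRequirement (n : Int) (L : List (List Int)) (R : List Int) : Int :=
  let I1 := L.foldl (aLight n) (List.replicate n.toNat 0)          -- I = [0]*n; for p,r in L: …
  let I2 := (PySem.List.pyRange 1 n 1).foldl                        -- for i in range(1, n): I[i] += I[i-1]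
      (fun J i => J.modify i.toNat (fun x => x + J.getD (i.toNat - 1) 0)) I1
  (PySem.List.pyRange 0 n 1).foldl                                  -- for i in range(n): if I[i] >= R[i]: out += 1
      (fun out i => if I2.getD i.toNat 0 ≥ R.getD i.toNat 0 then out + 1 else out) 0
  -- getD defaults are unreachable under Pre_ (indices are in range there)

-- ===== PORT B =====

-- one term of Source B's generator: (p - r <= i) - (p + r < i), booleans as ints
def bLight (i : Int) (lt : List Int) : Int :=
  match lt with
  | [p, r] => (if p - r ≤ i then 1 else 0) - (if p + r < i then 1 else 0)
  | _ => 0   -- a non-pair makes Python raise; excluded by Pre_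

def meetRequirement_alt (n : Int) (L : List (List Int)) (R : List Int) : Int :=
  (PySem.List.pyRange 0 n 1).foldl
    (fun out i =>
      let lit := (L.map (bLight i)).sum                             -- lit = sum(... for p, r in L)
      if lit ≥ R.getD i.toNat 0 then out + 1 else out) 0            -- if lit >= R[i]: out += 1

-- ===== PRECONDITION & SPEC =====

def goodLight (n : Int) (l : List Int) : Bool :=
  match l with
  | [p, r] => decide (max 0 (p - r) < n ∧ 0 ≤ p + r + 1)
  | _ => false

-- Pre_ excludes the inputs where A raises (a light whose clamped start index max(0,p-r) falls
-- outside the array, R shorter than n, a light entry that is not a pair) and the lights with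
-- p + r < -1, reaching entirely left of the street: there A's `I[p+r+1] -= 1` writes through a
-- negative Python index that wraps to the end of the array, a corner no caller specifies and
-- which B does not reproduce.
def Pre_meetRequirement (n : Int) (L : List (List Int)) (R : List Int) : Prop :=
  n ≤ (R.length : Int) ∧ ∀ l ∈ L, goodLight n l = true
instance (n : Int) (L : List (List Int)) (R : List Int) : Decidable (Pre_meetRequirement n L R) := by
  unfold Pre_meetRequirement; infer_instance

def pvWitness_meetRequirement : Int × List (List Int) × List Int := (3, [[1, 1]], [1, 0, 0])

def Spec_meetRequirement (n : Int) (L : List (List Int)) (R : List Int) (out : Int) : Prop := out = meetRequirement_alt n L R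
instance (n : Int) (L : List (List Int)) (R : List Int) (out : Int) : Decidable (Spec_meetRequirement n L R out) := by unfold Spec_meetRequirement; infer_instance

-- ===== CLAIM (what is proved, stated in full; the proofs are below) =====
def Claim_equal_meetRequirement : Prop := ∀ (n : Int) (L : List (List Int)) (R : List Int), Dom_meetRequirement n L R → Pre_meetRequirement n L R → Spec_meetRequirement n L R (meetRequirement n L R)

-- ===== LEMMAS AND PROOFS =====

theorem length_pyModify (I : List Int) (j : Int) (f : Int → Int) :
    (pyModify I j f).length = I.length := by
  unfold pyModify; split <;> simp

theorem length_aLight (n : Int) (I : List Int) (lt : List Int) :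
    (aLight n I lt).length = I.length := by
  unfold aLight
  match lt with
  | [p, r] => simp only; split <;> simp [length_pyModify]
  | [] => rfl
  | [_] => rfl
  | _ :: _ :: _ :: _ => rfl

theorem length_build (n : Int) (L : List (List Int)) (I : List Int) :
    (L.foldl (aLight n) I).length = I.length := by
  induction L generalizing I with
  | nil => rfl
  | cons l L ih => simpa [List.foldl_cons, length_aLight] using ih (aLight n I l)

-- sum of a prefix after an additive point update
theorem take_sum_modify_add (I : List Int) (j m : Nat) (c : Int) (hj : j < I.length) :
    ((I.modify j (fun x => x + c)).take m).sum
      = (I.take m).sum + (if j < m then c else 0) := by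
  induction I generalizing j m with
  | nil => simp at hj
  | cons a t ih =>
    cases j with
    | zero =>
      cases m with
      | zero => simp
      | succ m => simp [List.modify_zero_cons, List.take_succ_cons]; ring
    | succ j =>
      cases m with
      | zero => simp
      | succ m =>
        rw [List.modify_succ_cons, List.take_succ_cons, List.take_succ_cons,
          List.sum_cons, List.sum_cons, ih j m (by simpa using hj)]
        simp only [Nat.add_lt_add_iff_right]; ring

theorem pyModify_nonneg (I : List Int) (j : Int) (f : Int → Int) (h : 0 ≤ j) :
    pyModify I j f = I.modify j.toNat f := by
  unfold pyModify; rw [if_neg (not_lt.mpr h)]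

-- one step of A's first loop changes the prefix sum at k by exactly B's per-light term
theorem aLight_take_sum (n : Int) (I : List Int) (p r : Int)
    (hlen : I.length = n.toNat) (hg : goodLight n [p, r] = true) (k : Nat) (hk : k < n.toNat) :
    ((aLight n I [p, r]).take (k + 1)).sum
      = (I.take (k + 1)).sum + bLight (k : Int) [p, r] := by
  simp only [goodLight, decide_eq_true_eq] at hg
  obtain ⟨h1, h2⟩ := hg
  have hmax : (0 : Int) ≤ max 0 (p - r) := le_max_left _ _
  have hj1 : (max 0 (p - r)).toNat < I.length := by omega
  have e1 := take_sum_modify_add I (max 0 (p - r)).toNat (k + 1) 1 hj1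
  have hA : ((max 0 (p - r)).toNat < k + 1) = (p - r ≤ (k : Int)) := by
    apply propext; omega
  have hsubadd : (fun x : Int => x - 1) = (fun x : Int => x + (-1)) := by funext x; ring
  unfold aLight
  simp only [pyModify_nonneg _ _ _ hmax]
  by_cases hc : p + r + 1 < n
  · rw [if_pos hc, pyModify_nonneg _ _ _ h2, hsubadd,
      take_sum_modify_add _ (p + r + 1).toNat (k + 1) (-1)
        (by rw [List.length_modify]; omega),
      e1]
    have hB : ((p + r + 1).toNat < k + 1) = (p + r < (k : Int)) := by
      apply propext; omega
    simp only [bLight, hA, hB]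
    split <;> split <;> ring
  · rw [if_neg hc, e1]
    have hB : ¬ (p + r < (k : Int)) := by omega
    simp only [bLight, hA, if_neg hB]
    split <;> ring

-- after A's first loop, every prefix sum equals the sum of B's per-light terms
theorem build_take_sum (n : Int) (L : List (List Int)) (I : List Int)
    (hlen : I.length = n.toNat) (hL : ∀ l ∈ L, goodLight n l = true)
    (k : Nat) (hk : k < n.toNat) :
    ((L.foldl (aLight n) I).take (k + 1)).sum
      = (I.take (k + 1)).sum + (L.map (bLight (k : Int))).sum := by
  induction L generalizing I with
  | nil => simp
  | cons l L ih =>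
    have hl := hL l (List.mem_cons_self)
    obtain ⟨p, r, rfl⟩ : ∃ p r, l = [p, r] := by
      match l with
      | [p, r] => exact ⟨p, r, rfl⟩
      | [] => simp [goodLight] at hl
      | [_] => simp [goodLight] at hl
      | _ :: _ :: _ :: _ => simp [goodLight] at hl
    rw [List.foldl_cons, ih (aLight n I [p, r]) (by rw [length_aLight]; exact hlen)
        (fun x hx => hL x (List.mem_cons_of_mem _ hx)),
      aLight_take_sum n I p r hlen hl k hk]
    simp only [List.map_cons, List.sum_cons]
    ring

theorem getD_modify (t : List Int) (i j : Nat) (f : Int → Int) (hj : j < t.length) :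
    (t.modify i f).getD j 0 = if i = j then f (t.getD j 0) else t.getD j 0 := by
  simp [List.getD_eq_getElem?_getD, List.getElem?_modify, List.getElem?_eq_getElem hj]

-- A's second loop turns the array into its running prefix sums
theorem prefix_range (I : List Int) (t : Nat) (ht : t ≤ I.length) :
    ((List.range t).foldl (fun J s => J.modify (s + 1) (fun x => x + J.getD s 0)) I).length = I.length ∧
    ∀ k, k < I.length →
      ((List.range t).foldl (fun J s => J.modify (s + 1) (fun x => x + J.getD s 0)) I).getD k 0
        = if k ≤ t then (I.take (k + 1)).sum else I.getD k 0 := by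
  induction t with
  | zero =>
    refine ⟨rfl, fun k hk => ?_⟩
    simp only [List.range_zero, List.foldl_nil, Nat.le_zero]
    split
    · rename_i h; subst h
      rw [List.take_add_one, List.sum_append, List.getElem?_eq_getElem hk]
      simp [List.getD_eq_getElem?_getD, List.getElem?_eq_getElem hk]
    · rfl
  | succ t ih =>
    obtain ⟨ihlen, ihval⟩ := ih (by omega)
    rw [List.range_succ, List.foldl_append, List.foldl_cons, List.foldl_nil]
    set J := (List.range t).foldl (fun J s => J.modify (s + 1) (fun x => x + J.getD s 0)) I with hJ
    refine ⟨by rw [List.length_modify, ihlen], fun k hk => ?_⟩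
    rw [getD_modify _ _ _ _ (by rw [ihlen]; exact hk)]
    by_cases he : t + 1 = k
    · subst he
      rw [if_pos rfl, if_pos le_rfl, ihval t (by omega), ihval (t + 1) hk,
        if_pos le_rfl, if_neg (by omega)]
      rw [List.take_add_one (i := t + 1), List.sum_append]
      have : I[t+1]?.toList.sum = I.getD (t+1) 0 := by
        rw [List.getElem?_eq_getElem hk]
        simp [List.getD_eq_getElem?_getD, List.getElem?_eq_getElem hk]
      rw [this]; ring
    · rw [if_neg he, ihval k hk]
      by_cases hle : k ≤ t
      · rw [if_pos hle, if_pos (by omega)]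
      · rw [if_neg hle, if_neg (by omega)]

theorem prefix_loop (n : Int) (I : List Int) (hlen : I.length = n.toNat)
    (k : Nat) (hk : k < n.toNat) :
    ((PySem.List.pyRange 1 n 1).foldl
        (fun J i => J.modify i.toNat (fun x => x + J.getD (i.toNat - 1) 0)) I).getD k 0
      = (I.take (k + 1)).sum := by
  rw [PySem.List.pyRange_one, List.foldl_map]
  have hfe : (fun (J : List Int) (s : Nat) =>
        J.modify ((1 + (s : Int)).toNat) (fun x => x + J.getD ((1 + (s : Int)).toNat - 1) 0))
      = fun (J : List Int) (s : Nat) => J.modify (s + 1) (fun x => x + J.getD s 0) := by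
    funext J s
    have h1 : ((1 : Int) + (s : Int)).toNat = s + 1 := by omega
    rw [h1]
    simp
  rw [hfe]
  obtain ⟨-, hval⟩ := prefix_range I (n - 1).toNat (by omega)
  rw [hval k (by omega), if_pos (by omega)]

-- ===== VERDICT (by name: the statement is the Claim_ definition above) =====
theorem meetRequirement_spec : Claim_equal_meetRequirement := by
  intro n L R hDom hPre
  obtain ⟨hR, hL⟩ := hPre
  unfold Spec_meetRequirement meetRequirement meetRequirement_alt
  dsimp only
  apply PySem.List.foldl_congr_mem
  intro acc i hi
  rw [PySem.List.mem_pyRange_one] at hi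
  obtain ⟨h0, hn⟩ := hi
  have hk : i.toNat < n.toNat := by omega
  have hI1len : (L.foldl (aLight n) (List.replicate n.toNat 0)).length = n.toNat := by
    rw [length_build]; simp
  have hz : ((List.replicate n.toNat (0 : Int)).take (i.toNat + 1)).sum = 0 := by
    rw [List.take_replicate]; simp
  have hcast : ((i.toNat : Int)) = i := by omega
  rw [prefix_loop n _ hI1len i.toNat hk,
    build_take_sum n L (List.replicate n.toNat 0) (by simp) hL i.toNat hk, hz, zero_add, hcast]
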